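-- pv_equiv track=rewrite | github.com/kuru2141/Algorithm_From_2025_02_20 | 프로그래머스/2/12913. 땅따먹기/땅따먹기.py | solution
-- ===== SOURCE A (Python) =====
-- def solution(land):
--
--     for i in range(1, len(land)):
--         for j in range(4):
--             tmp = land[i][j]
--             for k in range(4):
--                 if j != k:
--                     land[i][j] = max(land[i][j], tmp + land[i - 1][k])
--
--
--     return max(land[-1])
-- ===== SOURCE B (Python) =====
-- def solution(land):
--     for i in range(1, len(land)):
--         prev = land[i - 1][:4]
--         max1 = max(prev)
--         idx1 = prev.index(max1)
--         max2 = max(prev[k] for k in range(4) if k != idx1)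
--         row = land[i]
--         for j in range(4):
--             best = max2 if j == idx1 else max1
--             if best > 0:
--                 row[j] += best
--     return max(land[-1])
-- ===== Notes on version B (the rewrite author's own statement) =====
-- stated objective: alternative
-- what changed: A's inner k-loop (for each cell, scan the other three columns of the previous row) is replaced by one top-two scan of the previous row: max1/argmax/max2 are computed once per row and each cell just adds max2 at the argmax column and max1 elsewhere (only when positive, matching A's never-decrease update).
import Mathlib
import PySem

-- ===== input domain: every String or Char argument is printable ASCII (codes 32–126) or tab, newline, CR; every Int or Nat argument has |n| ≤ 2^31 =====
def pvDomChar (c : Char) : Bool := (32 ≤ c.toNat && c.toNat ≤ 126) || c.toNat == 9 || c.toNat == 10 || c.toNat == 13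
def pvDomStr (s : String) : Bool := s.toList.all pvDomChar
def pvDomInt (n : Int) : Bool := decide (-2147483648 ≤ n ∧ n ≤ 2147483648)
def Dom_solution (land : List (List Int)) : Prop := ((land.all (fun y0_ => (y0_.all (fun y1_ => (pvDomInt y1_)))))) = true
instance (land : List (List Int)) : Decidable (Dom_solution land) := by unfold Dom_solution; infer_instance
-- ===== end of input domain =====

-- B replaces A's inner k-loop (max over the other three columns, per cell) by one top-two
-- scan of the previous row; objective: simpler (constant-factor fewer scans, same asymptotics).
-- Both Pythons mutate `land` in place identically; the theorems are about the return value.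

-- ===== PORT A =====

-- inner k-loop of A: land[i][j] = max(land[i][j], tmp + land[i-1][k]) for k ≠ j
def solA_inner (prev : List Int) (j tmp : Int) : Int :=
  (PySem.List.pyRange 0 4 1).foldl
    (fun acc k => if j ≠ k then max acc (tmp + PySem.List.pyGetD prev k 0) else acc) tmp

-- the j-loop over one row i (reads the previous row `prev`, updates row `r` in place)
def solA_row (prev r : List Int) : List Int :=
  (PySem.List.pyRange 0 4 1).foldl
    (fun r j => PySem.List.pySetD r j (solA_inner prev j (PySem.List.pyGetD r j 0))) r

-- the i-loop: each row is updated from the (already updated) previous row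
def solA_loop : List Int → List (List Int) → List (List Int)
  | _, [] => []
  | prev, r :: rs =>
      let r' := solA_row prev r
      r' :: solA_loop r' rs

def solution (land : List (List Int)) : Int :=
  match land with
  | [] => 0    -- Python raises IndexError on land[-1]; excluded by Pre_solution
  | h :: t =>
      let land' := h :: solA_loop h t
      (PySem.List.max? (PySem.List.pyGetD land' (-1) []) (fun y => y)).getD 0

-- ===== PORT B =====

-- one row step of B: top-two scan of prev[:4], then add the clamped best to each cell
def solB_row (prev r : List Int) : List Int :=
  let prev4 := PySem.List.slice prev (some 0) (some 4)
  let max1 := (PySem.List.max? prev4 (fun y => y)).getD 0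
  let idx1 : Int := ((PySem.List.index? prev4 max1).getD 0 : Nat)
  let max2 := (PySem.List.max?
      (((PySem.List.pyRange 0 4 1).filter (fun k => k ≠ idx1)).map
        (fun k => PySem.List.pyGetD prev4 k 0)) (fun y => y)).getD 0
  (PySem.List.pyRange 0 4 1).foldl
    (fun r j =>
      let best := if j = idx1 then max2 else max1
      if best > 0 then PySem.List.pySetD r j (PySem.List.pyGetD r j 0 + best) else r) r

def solB_loop : List Int → List (List Int) → List (List Int)
  | _, [] => []
  | prev, r :: rs =>
      let r' := solB_row prev r
      r' :: solB_loop r' rs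

def solution_alt (land : List (List Int)) : Int :=
  match land with
  | [] => 0    -- Python raises IndexError on land[-1]; excluded by Pre_solution
  | h :: t =>
      let land' := h :: solB_loop h t
      (PySem.List.max? (PySem.List.pyGetD land' (-1) []) (fun y => y)).getD 0

-- ===== PRECONDITION & SPEC =====
-- Exactly the inputs where the Python A returns: a single nonempty row, or ≥ 2 rows all of
-- length ≥ 4 (otherwise A raises IndexError on land[i][j] / land[i-1][k] or ValueError on max([])).
def Pre_solution (land : List (List Int)) : Prop :=
  (land.length = 1 ∧ ∀ row ∈ land, row ≠ []) ∨
  (2 ≤ land.length ∧ ∀ row ∈ land, 4 ≤ row.length)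
instance (land : List (List Int)) : Decidable (Pre_solution land) := by
  unfold Pre_solution; infer_instance

def pvWitness_solution : List (List Int) := [[1, 2, 3, 5], [5, 6, 7, 8], [4, 3, 2, 1]]

def Spec_solution (land : List (List Int)) (out : Int) : Prop := out = solution_alt land
instance (land : List (List Int)) (out : Int) : Decidable (Spec_solution land out) := by
  unfold Spec_solution; infer_instance

-- ===== CLAIM (what is proved, stated in full; the proofs are below) =====
def Claim_equal_solution : Prop :=
  ∀ (land : List (List Int)), Dom_solution land → Pre_solution land →
    Spec_solution land (solution land)

-- ===== LEMMAS AND PROOFS =====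

theorem set_getD_self : ∀ (r : List Int) (n : Nat), r.set n (r[n]?.getD 0) = r
  | [], _ => by simp
  | _ :: _, 0 => by simp
  | x :: r, n + 1 => by simp [set_getD_self r n]

theorem step_eq (acc : List Int) (n : Nat) (MA MB : Int) (P : Prop) [inst : Decidable P]
    (hM : MA = MB) (hP : P ↔ 0 < MB) :
    PySem.List.pySetD acc (n : Int) (acc[n]?.getD 0 + max 0 MA) =
      (if P then PySem.List.pySetD acc (n : Int) (acc[n]?.getD 0 + MB) else acc) := by
  subst hM
  by_cases h : P
  · rw [if_pos h]
    have := hP.mp h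
    congr 1
    omega
  · rw [if_neg h]
    have hz : max 0 MA = 0 := by rw [hP] at h; omega
    rw [hz, add_zero]
    simp [set_getD_self]

theorem pyRange04 : PySem.List.pyRange 0 4 1 = [0, 1, 2, 3] := by decide

theorem slice04 (a b c d : Int) (rest : List Int) :
    PySem.List.slice (a :: b :: c :: d :: rest) (some 0) (some 4) = [a, b, c, d] := by
  rw [PySem.List.slice_zero_start, PySem.List.slice_to _ (by norm_num)]
  show List.take 4 _ = _
  simp [List.take_succ_cons]
-- A's inner loop computes tmp + max 0 (max over the other three columns)
theorem innerA_eq (a b c d : Int) (rest : List Int) (tmp j : Int)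
    (hj : j = 0 ∨ j = 1 ∨ j = 2 ∨ j = 3) :
    solA_inner (a :: b :: c :: d :: rest) j tmp =
      tmp + max 0 (if j = 0 then max (max b c) d
                   else if j = 1 then max (max a c) d
                   else if j = 2 then max (max a b) d
                   else max (max a b) c) := by
  rcases hj with h | h | h | h <;> subst h <;>
    simp [solA_inner, pyRange04, List.foldl, PySem.List.pyGetD_ofNat', List.getD] <;> omega

theorem length_foldl_pySetD (l : List Int) (g : List Int → Int → Int) :
    ∀ (r : List Int), (l.foldl (fun r j => PySem.List.pySetD r j (g r j)) r).length = r.length := by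
  induction l with
  | nil => intro r; rfl
  | cons x l ih => intro r; simp only [List.foldl]; rw [ih, PySem.List.length_pySetD]

theorem length_solA_row (prev r : List Int) : (solA_row prev r).length = r.length :=
  length_foldl_pySetD _ _ r

theorem row_eq (prev r : List Int) (hp : 4 ≤ prev.length) :
    solA_row prev r = solB_row prev r := by
  obtain ⟨a, b, c, d, rest, rfl⟩ : ∃ a b c d rest, prev = a :: b :: c :: d :: rest := by
    rcases prev with _ | ⟨a, _ | ⟨b, _ | ⟨c, _ | ⟨d, rest⟩⟩⟩⟩ <;>
      first
        | (exfalso; simp only [List.length_cons, List.length_nil] at hp; omega)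
        | exact ⟨a, b, c, d, rest, rfl⟩
  simp only [solA_row, solB_row, pyRange04, slice04, PySem.List.max?_id_cons,
    Option.getD_some]
  set m := List.foldl max a [b, c, d] with hm
  have hm' : m = max (max (max a b) c) d := by simp [hm, List.foldl]
  apply PySem.List.foldl_congr_mem
  intro acc x hx
  by_cases h1 : a = m
  · have hi : PySem.List.index? [a, b, c, d] m = some 0 := by
      rw [h1]; simp [List.idxOf?, List.findIdx?_cons]
    rw [hi]
    simp only [Option.getD_some, Nat.cast_zero]
    fin_cases hx <;>
      rw [innerA_eq a b c d rest _ _ (by norm_num)] <;>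
      norm_num [List.filter, List.map, PySem.List.pyGetD_ofNat', List.getD,
        PySem.List.max?_id_cons, List.foldl] <;>
      exact step_eq acc _ _ _ _ (by omega) (by omega)
  · by_cases h2 : b = m
    · have hi : PySem.List.index? [a, b, c, d] m = some 1 := by
        simp [List.idxOf?, List.findIdx?_cons, h1, h2]
      rw [hi]
      simp only [Option.getD_some, Nat.cast_one]
      fin_cases hx <;>
        rw [innerA_eq a b c d rest _ _ (by norm_num)] <;>
        norm_num [List.filter, List.map, PySem.List.pyGetD_ofNat', List.getD,
          PySem.List.max?_id_cons, List.foldl] <;>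
        exact step_eq acc _ _ _ _ (by omega) (by omega)
    · by_cases h3 : c = m
      · have hi : PySem.List.index? [a, b, c, d] m = some 2 := by
          simp [List.idxOf?, List.findIdx?_cons, h1, h2, h3]
        rw [hi]
        simp only [Option.getD_some, Nat.cast_ofNat]
        fin_cases hx <;>
          rw [innerA_eq a b c d rest _ _ (by norm_num)] <;>
          norm_num [List.filter, List.map, PySem.List.pyGetD_ofNat', List.getD,
            PySem.List.max?_id_cons, List.foldl] <;>
          exact step_eq acc _ _ _ _ (by omega) (by omega)
      · have h4 : d = m := by omega
        have hi : PySem.List.index? [a, b, c, d] m = some 3 := by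
          simp [List.idxOf?, List.findIdx?_cons, h1, h2, h3, h4]
        rw [hi]
        simp only [Option.getD_some, Nat.cast_ofNat]
        fin_cases hx <;>
          rw [innerA_eq a b c d rest _ _ (by norm_num)] <;>
          norm_num [List.filter, List.map, PySem.List.pyGetD_ofNat', List.getD,
            PySem.List.max?_id_cons, List.foldl] <;>
          exact step_eq acc _ _ _ _ (by omega) (by omega)

theorem loop_eq : ∀ (rs : List (List Int)) (prev : List Int), 4 ≤ prev.length →
    (∀ x ∈ rs, 4 ≤ x.length) → solA_loop prev rs = solB_loop prev rs := by
  intro rs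
  induction rs with
  | nil => intro prev _ _; rfl
  | cons r rs ih =>
      intro prev hp hr
      simp only [solA_loop, solB_loop]
      rw [← row_eq prev r hp, ih (solA_row prev r)
        (by rw [length_solA_row]; exact hr r (by simp))
        (fun x hx => hr x (by simp [hx]))]

-- ===== VERDICT (by name: the statement is the Claim_ definition above) =====
theorem solution_spec : Claim_equal_solution := by
  intro land _ hpre
  unfold Spec_solution
  cases land with
  | nil => rfl
  | cons h t =>
      rcases hpre with ⟨h1, _⟩ | ⟨_, hall⟩
      · have ht : t = [] := by simpa using h1
        subst ht; rfl
      · simp only [solution, solution_alt]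
        rw [loop_eq t h (hall h (by simp)) (fun x hx => hall x (by simp [hx]))]
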